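-- pv_equiv track=rewrite | github.com/CorradoColaleo/CyberChallengeIT | TestDiAmmissione/Aliens/aliens.py | execute_code
-- ===== SOURCE A (Python) =====
-- ALPHABET = "abcdefghijklmnopqrstuvwxyzABCDEFGHIJKLMNOPQRSTUVWXYZ0123456789"
--
-- ALPHABET_LEN = len(ALPHABET)
--
-- def execute_code(N, code):
--     result = []
--
--     for operation in code:
--         parts = operation.split()
--         cmd = parts[0]
--
--         if cmd == "add":
--             result.append(parts[1])
--
--         elif cmd == "del":
--             if result:
--                 result.pop()
--
--         elif cmd == "swap":
--             a, b = parts[1], parts[2]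
--             result = [b if c == a else a if c == b else c for c in result]
--
--         elif cmd == "rot":
--             x = int(parts[1])
--             result = [
--                 ALPHABET[(ALPHABET.index(c) + x) % ALPHABET_LEN] if c in ALPHABET else c
--                 for c in result
--             ]
--
--     return "".join(result)
--
-- code = []
-- ===== SOURCE B (Python) =====
-- ALPHABET = "abcdefghijklmnopqrstuvwxyzABCDEFGHIJKLMNOPQRSTUVWXYZ0123456789"
--
-- ALPHABET_LEN = len(ALPHABET)
--
-- def execute_code(N, code):
--     # One backward pass: compose all pending swap/rot operations lazily as a
--     # token->value mapping F over the finite closed token domain D, cancel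
--     # add/del pairs with a skip counter, and emit each surviving token's
--     # final value the moment its add is reached.
--     parsed = [op.split() for op in code]
--     toks = [c for c in ALPHABET]
--     for parts in parsed:
--         cmd = parts[0]
--         if cmd == "add":
--             toks.append(parts[1])
--         elif cmd == "swap":
--             toks.append(parts[1])
--             toks.append(parts[2])
--     D = list(dict.fromkeys(toks))
--     F = {t: t for t in D}
--     subD = [t for t in D if t in ALPHABET]
--     skip = 0
--     out = []
--     for parts in reversed(parsed):
--         cmd = parts[0]
--         if cmd == "add":
--             if skip != 0:
--                 skip -= 1
--             else:
--                 t = parts[1]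
--                 out.append(F[t])
--         elif cmd == "del":
--             skip += 1
--         elif cmd == "swap":
--             a, b = parts[1], parts[2]
--             F[a], F[b] = F[b], F[a]
--         elif cmd == "rot":
--             x = int(parts[1])
--             F.update({t: F[ALPHABET[(ALPHABET.index(t) + x) % ALPHABET_LEN]] for t in subD})
--     return "".join(reversed(out))
-- ===== Notes on version B (the rewrite author's own statement) =====
-- stated objective: faster
-- what changed: Instead of rewriting the whole stack on every swap/rot (O(n) per operation), B makes one backward pass that lazily composes all pending swap/rot operations into a token-to-value mapping over the finite closed token domain (add tokens, swap arguments, the 62 alphabet symbols), cancels add/del pairs with a skip counter, and emits each surviving token's final value directly.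
import Mathlib
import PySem

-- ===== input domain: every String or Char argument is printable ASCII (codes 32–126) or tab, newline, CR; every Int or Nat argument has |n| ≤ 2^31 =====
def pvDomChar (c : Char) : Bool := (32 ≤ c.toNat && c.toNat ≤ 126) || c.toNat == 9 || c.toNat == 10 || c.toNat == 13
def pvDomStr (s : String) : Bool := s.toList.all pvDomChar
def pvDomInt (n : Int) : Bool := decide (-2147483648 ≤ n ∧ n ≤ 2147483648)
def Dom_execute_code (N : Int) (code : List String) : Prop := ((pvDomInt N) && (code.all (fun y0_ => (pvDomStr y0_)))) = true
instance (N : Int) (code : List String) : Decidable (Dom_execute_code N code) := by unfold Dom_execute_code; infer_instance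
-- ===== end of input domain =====

-- B replaces A's per-operation whole-stack rewriting by a single backward pass that lazily
-- composes the pending swap/rot operations into a token-to-value mapping over a finite
-- closed token domain (objective: faster; return value only, no mutation involved).


-- ===== PORT A =====
def ALPHA : String := "abcdefghijklmnopqrstuvwxyzABCDEFGHIJKLMNOPQRSTUVWXYZ0123456789"

def ALPHABET_LEN : Int := PySem.Str.len ALPHA

-- ALPHABET[(ALPHABET.index(c) + x) % ALPHABET_LEN] — this exact expression occurs in both
-- Pythons; the `none` arm is unreachable (the index is a mod, hence in range).
def rotTok (x : Int) (c : String) : String :=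
  match PySem.Str.pyGet? ALPHA (PySem.Int.mod (PySem.Str.find ALPHA c + x) ALPHABET_LEN) with
  | some ch => String.ofList [ch]
  | none => c

-- the body of A's loop on the already-split operation (the parts[i] defaults are dead under Pre_)
def execStep (result : List String) (parts : List String) : List String :=
  if parts.headD "" = "add" then
    result ++ [parts.getD 1 ""]
  else if parts.headD "" = "del" then
    result.dropLast
  else if parts.headD "" = "swap" then
    result.map (fun c =>
      if c = parts.getD 1 "" then parts.getD 2 ""
      else if c = parts.getD 2 "" then parts.getD 1 "" else c)
  else if parts.headD "" = "rot" then
    result.map (fun c =>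
      if PySem.Str.isIn c ALPHA then rotTok ((PySem.Int.ofStr? (parts.getD 1 "")).getD 0) c else c)
  else result

def execute_code (N : Int) (code : List String) : String :=
  PySem.Str.join "" (code.foldl (fun result operation => execStep result (PySem.Str.split₀ operation)) [])

-- ===== PORT B =====
-- collect the token domain: the 62 alphabet symbols, add tokens and swap arguments
def bTokStep (acc : List String) (parts : List String) : List String :=
  if parts.headD "" = "add" then acc ++ [parts.getD 1 ""]
  else if parts.headD "" = "swap" then acc ++ [parts.getD 1 "", parts.getD 2 ""]
  else acc

-- one step of B's backward pass; state = (F, skip, out)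
def bStep (subD : List String) (st : PySem.Dict String String × Int × List String)
    (parts : List String) : PySem.Dict String String × Int × List String :=
  let F := st.1
  let skip := st.2.1
  let out := st.2.2
  if parts.headD "" = "add" then
    if skip ≠ 0 then (F, skip - 1, out)
    else (F, skip, out ++ [F.getD (parts.getD 1 "") (parts.getD 1 "")])
  else if parts.headD "" = "del" then
    (F, skip + 1, out)
  else if parts.headD "" = "swap" then
    ((F.insert (parts.getD 1 "") (F.getD (parts.getD 2 "") (parts.getD 2 ""))).insert
        (parts.getD 2 "") (F.getD (parts.getD 1 "") (parts.getD 1 "")), skip, out)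
  else if parts.headD "" = "rot" then
    (subD.foldl (fun g t =>
        g.insert t (F.getD (rotTok ((PySem.Int.ofStr? (parts.getD 1 "")).getD 0) t)
                           (rotTok ((PySem.Int.ofStr? (parts.getD 1 "")).getD 0) t))) F,
     skip, out)
  else (F, skip, out)

def execute_code_alt (N : Int) (code : List String) : String :=
  let parsed := code.map (fun op => PySem.Str.split₀ op)
  let toks := parsed.foldl bTokStep (ALPHA.toList.map (fun ch => String.ofList [ch]))
  let D := PySem.List.dedup toks
  let F0 : PySem.Dict String String := D.foldl (fun d t => d.insert t t) PySem.Dict.empty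
  let subD := D.filter (fun t => PySem.Str.isIn t ALPHA)
  let fin := parsed.reverse.foldl (bStep subD) (F0, 0, [])
  PySem.Str.join "" fin.2.2.reverse

-- ===== PRECONDITION & SPEC =====
-- Pre_ excludes exactly the inputs on which Python A raises: an operation whose split() is
-- empty (IndexError on parts[0]), an add/swap/rot with too few fields (IndexError), and a
-- rot whose argument int() rejects (ValueError).
def Pre_execute_code (N : Int) (code : List String) : Prop :=
  ∀ op ∈ code,
    PySem.Str.split₀ op ≠ [] ∧
    ((PySem.Str.split₀ op).headD "" = "add" → 2 ≤ (PySem.Str.split₀ op).length) ∧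
    ((PySem.Str.split₀ op).headD "" = "swap" → 3 ≤ (PySem.Str.split₀ op).length) ∧
    ((PySem.Str.split₀ op).headD "" = "rot" → 2 ≤ (PySem.Str.split₀ op).length ∧
      (PySem.Int.ofStr? ((PySem.Str.split₀ op).getD 1 "")).isSome)

instance (N : Int) (code : List String) : Decidable (Pre_execute_code N code) := by
  unfold Pre_execute_code; infer_instance

def pvWitness_execute_code : Int × List String :=
  (0, ["add a", "add Z9", "swap a b", "rot 3", "del", "add hi", "rot -1", "noop"])

def Spec_execute_code (N : Int) (code : List String) (out : String) : Prop := out = execute_code_alt N code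
instance (N : Int) (code : List String) (out : String) : Decidable (Spec_execute_code N code out) := by unfold Spec_execute_code; infer_instance

-- ===== CLAIM (what is proved, stated in full; the proofs are below) =====
def Claim_equal_execute_code : Prop := ∀ (N : Int) (code : List String), Dom_execute_code N code → Pre_execute_code N code → Spec_execute_code N code (execute_code N code)

-- ===== LEMMAS AND PROOFS =====

-- value map of a single operation (identity for add/del/unknown commands)
def gval (p : List String) (c : String) : String :=
  if p.headD "" = "swap" then
    (if c = p.getD 1 "" then p.getD 2 "" else if c = p.getD 2 "" then p.getD 1 "" else c)
  else if p.headD "" = "rot" then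
    (if PySem.Str.isIn c ALPHA then rotTok ((PySem.Int.ofStr? (p.getD 1 "")).getD 0) c else c)
  else c

-- composed value map of a whole list of operations, applied in order
def Tm : List (List String) → String → String
  | [], c => c
  | p :: ps, c => Tm ps (gval p c)

-- A's stack evolution with each pushed token's final value baked in at push time
def Bsem : List (List String) → List String → List String
  | [], acc => acc
  | p :: ps, acc =>
    if p.headD "" = "add" then Bsem ps (acc ++ [Tm ps (p.getD 1 "")])
    else if p.headD "" = "del" then Bsem ps acc.dropLast
    else Bsem ps acc

-- how many del's of ops fall through to the stack below
def eCnt : List (List String) → Nat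
  | [] => 0
  | p :: ps =>
    if p.headD "" = "add" then eCnt ps - 1
    else if p.headD "" = "del" then eCnt ps + 1
    else eCnt ps

-- the output ops produce from an empty stack
def Bk : List (List String) → List String
  | [] => []
  | p :: ps =>
    if p.headD "" = "add" then (if eCnt ps = 0 then [Tm ps (p.getD 1 "")] else []) ++ Bk ps
    else Bk ps

-- the dict B holds after (backward-)processing the operation list
def FD (subD : List String) (F0 : PySem.Dict String String) :
    List (List String) → PySem.Dict String String
  | [] => F0
  | p :: ps =>
    let F := FD subD F0 ps
    if p.headD "" = "add" then F
    else if p.headD "" = "del" then F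
    else if p.headD "" = "swap" then
      (F.insert (p.getD 1 "") (F.getD (p.getD 2 "") (p.getD 2 ""))).insert
        (p.getD 2 "") (F.getD (p.getD 1 "") (p.getD 1 ""))
    else if p.headD "" = "rot" then
      subD.foldl (fun g t =>
        g.insert t (F.getD (rotTok ((PySem.Int.ofStr? (p.getD 1 "")).getD 0) t)
                           (rotTok ((PySem.Int.ofStr? (p.getD 1 "")).getD 0) t))) F
    else F

theorem Tm_cons (p : List String) (ps : List (List String)) (c : String) :
    Tm (p :: ps) c = Tm ps (gval p c) := rfl

theorem gval_id (p : List String) (h1 : p.headD "" ≠ "swap") (h2 : p.headD "" ≠ "rot")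
    (c : String) : gval p c = c := by rw [gval, if_neg h1, if_neg h2]

theorem foldl_execStep_eq_Bsem (ops : List (List String)) (r : List String) :
    ops.foldl execStep r = Bsem ops (r.map (Tm ops)) := by
  induction ops generalizing r with
  | nil =>
    simp only [List.foldl_nil, Bsem]
    rw [show Tm [] = id from funext fun c => rfl, List.map_id]
  | cons p ps ih =>
    simp only [List.foldl_cons]
    rw [ih]
    by_cases hadd : p.headD "" = "add"
    · have hsw : p.headD "" ≠ "swap" := by rw [hadd]; decide
      have hrot : p.headD "" ≠ "rot" := by rw [hadd]; decide
      have hR : Bsem (p :: ps) (r.map (Tm (p :: ps)))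
          = Bsem ps (r.map (Tm (p :: ps)) ++ [Tm ps (p.getD 1 "")]) := by
        rw [Bsem, if_pos hadd]
      rw [hR]
      congr 1
      rw [execStep, if_pos hadd, List.map_append]
      congr 1
      exact List.map_congr_left (fun c _ => by rw [Tm_cons, gval_id p hsw hrot])
    · by_cases hdel : p.headD "" = "del"
      · have hsw : p.headD "" ≠ "swap" := by rw [hdel]; decide
        have hrot : p.headD "" ≠ "rot" := by rw [hdel]; decide
        have hR : Bsem (p :: ps) (r.map (Tm (p :: ps)))
            = Bsem ps (r.map (Tm (p :: ps))).dropLast := by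
          rw [Bsem, if_neg hadd, if_pos hdel]
        rw [hR]
        congr 1
        rw [execStep, if_neg hadd, if_pos hdel, ← List.map_dropLast]
        exact List.map_congr_left (fun c _ => by rw [Tm_cons, gval_id p hsw hrot])
      · have hR : Bsem (p :: ps) (r.map (Tm (p :: ps))) = Bsem ps (r.map (Tm (p :: ps))) := by
          rw [Bsem, if_neg hadd, if_neg hdel]
        rw [hR]
        congr 1
        by_cases hsw : p.headD "" = "swap"
        · have hrot : p.headD "" ≠ "rot" := by rw [hsw]; decide
          rw [execStep, if_neg hadd, if_neg hdel, if_pos hsw, List.map_map]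
          exact List.map_congr_left (fun c _ => by
            rw [Tm_cons, gval, if_pos hsw]
            rfl)
        · by_cases hrot : p.headD "" = "rot"
          · rw [execStep, if_neg hadd, if_neg hdel, if_neg hsw, if_pos hrot, List.map_map]
            exact List.map_congr_left (fun c _ => by
              rw [Tm_cons, gval, if_neg hsw, if_pos hrot]
              rfl)
          · rw [execStep, if_neg hadd, if_neg hdel, if_neg hsw, if_neg hrot]
            exact List.map_congr_left (fun c _ => by rw [Tm_cons, gval_id p hsw hrot])

theorem Bsem_eq_take_append_Bk (ops : List (List String)) (acc : List String) :
    Bsem ops acc = acc.take (acc.length - eCnt ops) ++ Bk ops := by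
  induction ops generalizing acc with
  | nil => simp [Bsem, eCnt, Bk]
  | cons p ps ih =>
    by_cases hadd : p.headD "" = "add"
    · rw [show Bsem (p :: ps) acc = Bsem ps (acc ++ [Tm ps (p.getD 1 "")]) from by
        rw [Bsem, if_pos hadd]]
      rw [show eCnt (p :: ps) = eCnt ps - 1 from by rw [eCnt, if_pos hadd]]
      rw [show Bk (p :: ps) = (if eCnt ps = 0 then [Tm ps (p.getD 1 "")] else []) ++ Bk ps from by
        rw [Bk, if_pos hadd]]
      rw [ih]
      by_cases he : eCnt ps = 0
      · rw [he, show (0:Nat) - 1 = 0 from rfl, Nat.sub_zero, Nat.sub_zero,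
          List.take_length, List.take_length, if_pos rfl, List.append_assoc]
      · obtain ⟨k, hk⟩ : ∃ k, eCnt ps = k + 1 := ⟨eCnt ps - 1, by omega⟩
        rw [hk, Nat.add_sub_cancel, if_neg (by omega : ¬ (k + 1 = 0)), List.nil_append]
        rw [show (acc ++ [Tm ps (p.getD 1 "")]).length - (k + 1) = acc.length - k from by
          simp only [List.length_append, List.length_cons, List.length_nil]; omega]
        rw [List.take_append_of_le_length (by omega)]

    · by_cases hdel : p.headD "" = "del"
      · rw [show Bsem (p :: ps) acc = Bsem ps acc.dropLast from by
          rw [Bsem, if_neg hadd, if_pos hdel]]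
        rw [show eCnt (p :: ps) = eCnt ps + 1 from by rw [eCnt, if_neg hadd, if_pos hdel]]
        rw [show Bk (p :: ps) = Bk ps from by rw [Bk, if_neg hadd]]
        rw [ih, List.dropLast_eq_take, List.take_take, List.length_take]
        congr 2
        omega
      · rw [show Bsem (p :: ps) acc = Bsem ps acc from by rw [Bsem, if_neg hadd, if_neg hdel]]
        rw [show eCnt (p :: ps) = eCnt ps from by rw [eCnt, if_neg hadd, if_neg hdel]]
        rw [show Bk (p :: ps) = Bk ps from by rw [Bk, if_neg hadd]]
        exact ih acc

theorem getD_foldl_insert_not_mem (l : List String) (d : PySem.Dict String String)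
    (t v : String) (ht : t ∉ l) :
    (l.foldl (fun d t => d.insert t t) d).getD t v = d.getD t v := by
  induction l generalizing d with
  | nil => rfl
  | cons h tl ih =>
    simp only [List.mem_cons, not_or] at ht
    simp only [List.foldl_cons]
    rw [ih _ ht.2, PySem.Dict.getD_insert_of_ne _ _ _ ht.1]

theorem getD_foldl_insert_self_of_mem (l : List String) (d : PySem.Dict String String)
    (t : String) (ht : t ∈ l) :
    (l.foldl (fun d t => d.insert t t) d).getD t t = t := by
  induction l generalizing d with
  | nil => cases ht
  | cons h tl ih =>
    simp only [List.foldl_cons]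
    by_cases htl : t ∈ tl
    · exact ih _ htl
    · have : t = h := by rcases List.mem_cons.mp ht with h1 | h2; exact h1; exact absurd h2 htl
      subst this
      rw [getD_foldl_insert_not_mem _ _ _ _ htl, PySem.Dict.getD_insert_self]

theorem getD_rot_fold (l : List String) (F : PySem.Dict String String)
    (rc : String → String) (g : PySem.Dict String String) (k : String) :
    (l.foldl (fun g t => g.insert t (F.getD (rc t) (rc t))) g).getD k k
      = if k ∈ l then F.getD (rc k) (rc k) else g.getD k k := by
  induction l generalizing g with
  | nil => simp
  | cons h tl ih =>
    simp only [List.foldl_cons]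
    rw [ih]
    by_cases hk : k ∈ tl
    · simp [hk]
    · by_cases hkh : k = h
      · subst hkh; simp [hk, PySem.Dict.getD_insert_self]
      · simp [hk, hkh, PySem.Dict.getD_insert_of_ne _ _ _ hkh]

theorem rotTok_mem_alpha (x : Int) (c : String) :
    ∃ ch ∈ ALPHA.toList, rotTok x c = String.ofList [ch] := by
  unfold rotTok
  set i := PySem.Int.mod (PySem.Str.find ALPHA c + x) ALPHABET_LEN with hi
  have hpos : (0:Int) < ALPHABET_LEN := by decide
  have h0 : 0 ≤ i := PySem.Int.mod_nonneg _ hpos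
  have hlt : i < ALPHABET_LEN := PySem.Int.mod_lt _ hpos
  have hlen : ALPHA.toList.length = 62 := by decide
  have h62 : (ALPHABET_LEN : Int) = 62 := by decide
  have hN : i.toNat < ALPHA.toList.length := by omega
  have hsome : PySem.Str.pyGet? ALPHA i = some (ALPHA.toList[i.toNat]) := by
    conv_lhs => rw [← Int.toNat_of_nonneg h0]
    rw [PySem.Str.pyGet?_natCast, List.getElem?_eq_getElem hN]
  rw [hsome]
  exact ⟨_, List.getElem_mem _, rfl⟩

theorem FD_inv (D subD : List String) (F0 : PySem.Dict String String)
    (hchar : ∀ ch ∈ ALPHA.toList, String.ofList [ch] ∈ D)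
    (hsub : ∀ t, t ∈ subD ↔ t ∈ D ∧ PySem.Str.isIn t ALPHA = true)
    (hF0 : ∀ t ∈ D, F0.getD t t = t)
    (ps : List (List String))
    (hops : ∀ p ∈ ps, (p.headD "" = "add" → p.getD 1 "" ∈ D) ∧
        (p.headD "" = "swap" → p.getD 1 "" ∈ D ∧ p.getD 2 "" ∈ D)) :
    ∀ t ∈ D, (FD subD F0 ps).getD t t = Tm ps t := by
  induction ps with
  | nil => exact hF0
  | cons p ps ih =>
    have ihps := ih (fun q hq => hops q (List.mem_cons_of_mem p hq))
    intro t ht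
    have hTm : Tm (p :: ps) t = Tm ps (gval p t) := rfl
    by_cases hsw : p.headD "" = "swap"
    · have hadd : p.headD "" ≠ "add" := by rw [hsw]; decide
      have hdel : p.headD "" ≠ "del" := by rw [hsw]; decide
      obtain ⟨ha, hb⟩ := (hops p (List.mem_cons_self)).2 hsw
      have hFD : FD subD F0 (p :: ps)
          = ((FD subD F0 ps).insert (p.getD 1 "") ((FD subD F0 ps).getD (p.getD 2 "") (p.getD 2 ""))).insert
              (p.getD 2 "") ((FD subD F0 ps).getD (p.getD 1 "") (p.getD 1 "")) := by
        rw [FD, if_neg hadd, if_neg hdel, if_pos hsw]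
      rw [hFD, hTm]
      by_cases htb : t = p.getD 2 ""
      · rw [htb, PySem.Dict.getD_insert_self]
        have hgv : gval p (p.getD 2 "") = p.getD 1 "" := by
          rw [gval, if_pos hsw]
          by_cases h2 : p.getD 2 "" = p.getD 1 ""
          · rw [if_pos h2, h2]
          · rw [if_neg h2, if_pos rfl]
        rw [hgv]
        exact ihps _ ha
      · rw [PySem.Dict.getD_insert_of_ne _ _ _ htb]
        by_cases hta : t = p.getD 1 ""
        · have hne : p.getD 1 "" ≠ p.getD 2 "" := fun h => htb (hta.trans h)
          rw [hta, PySem.Dict.getD_insert_self]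
          have hgv : gval p (p.getD 1 "") = p.getD 2 "" := by
            rw [gval, if_pos hsw, if_pos rfl]
          rw [hgv]
          exact ihps _ hb
        · rw [PySem.Dict.getD_insert_of_ne _ _ _ hta]
          have hgv : gval p t = t := by
            rw [gval, if_pos hsw, if_neg hta, if_neg htb]
          rw [hgv]
          exact ihps _ ht
    · by_cases hrot : p.headD "" = "rot"
      · have hadd : p.headD "" ≠ "add" := by rw [hrot]; decide
        have hdel : p.headD "" ≠ "del" := by rw [hrot]; decide
        set x := (PySem.Int.ofStr? (p.getD 1 "")).getD 0 with hx
        have hFD : FD subD F0 (p :: ps)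
            = subD.foldl (fun g t =>
                g.insert t ((FD subD F0 ps).getD (rotTok x t) (rotTok x t))) (FD subD F0 ps) := by
          rw [FD, if_neg hadd, if_neg hdel, if_neg hsw, if_pos hrot]
        rw [hFD, hTm, getD_rot_fold]
        by_cases hin : PySem.Str.isIn t ALPHA = true
        · have htsub : t ∈ subD := (hsub t).mpr ⟨ht, hin⟩
          rw [if_pos htsub]
          have hgv : gval p t = rotTok x t := by
            rw [gval, if_neg hsw, if_pos hrot, if_pos hin]
          rw [hgv]
          obtain ⟨ch, hch, heq⟩ := rotTok_mem_alpha x t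
          exact ihps _ (heq ▸ hchar ch hch)
        · have htsub : t ∉ subD := fun h => hin ((hsub t).mp h).2
          rw [if_neg htsub]
          have hgv : gval p t = t := by
            rw [gval, if_neg hsw, if_pos hrot, if_neg hin]
          rw [hgv]
          exact ihps _ ht
      · have hFD : FD subD F0 (p :: ps) = FD subD F0 ps := by
          rw [FD]
          by_cases hadd : p.headD "" = "add"
          · rw [if_pos hadd]
          · rw [if_neg hadd]
            by_cases hdel : p.headD "" = "del"
            · rw [if_pos hdel]
            · rw [if_neg hdel, if_neg hsw, if_neg hrot]
        rw [hFD, hTm, gval_id p hsw hrot]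
        exact ihps _ ht

theorem subset_foldl_bTokStep (l : List (List String)) (acc : List String) :
    acc ⊆ l.foldl bTokStep acc := by
  induction l generalizing acc with
  | nil => exact fun _ h => h
  | cons p tl ih =>
    intro a ha
    apply ih (bTokStep acc p)
    rw [bTokStep]
    split_ifs <;> first | exact List.mem_append_left _ ha | exact ha

theorem tokens_mem_foldl_bTokStep (l : List (List String)) (acc : List String)
    (p : List String) (hp : p ∈ l) :
    (p.headD "" = "add" → p.getD 1 "" ∈ l.foldl bTokStep acc) ∧
    (p.headD "" = "swap" → p.getD 1 "" ∈ l.foldl bTokStep acc ∧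
      p.getD 2 "" ∈ l.foldl bTokStep acc) := by
  induction l generalizing acc with
  | nil => cases hp
  | cons q tl ih =>
    rcases List.mem_cons.mp hp with hq | htl
    · subst hq
      simp only [List.foldl_cons]
      constructor
      · intro hadd
        apply subset_foldl_bTokStep
        rw [bTokStep, if_pos hadd]
        exact List.mem_append_right _ (by simp)
      · intro hsw
        have hadd : p.headD "" ≠ "add" := by rw [hsw]; decide
        constructor <;>
        · apply subset_foldl_bTokStep
          rw [bTokStep, if_neg hadd, if_pos hsw]
          exact List.mem_append_right _ (by simp)
    · simp only [List.foldl_cons]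
      exact ih _ htl

theorem foldl_bStep_eq (D subD : List String) (F0 : PySem.Dict String String)
    (hchar : ∀ ch ∈ ALPHA.toList, String.ofList [ch] ∈ D)
    (hsub : ∀ t, t ∈ subD ↔ t ∈ D ∧ PySem.Str.isIn t ALPHA = true)
    (hF0 : ∀ t ∈ D, F0.getD t t = t)
    (ops : List (List String))
    (hops : ∀ p ∈ ops, (p.headD "" = "add" → p.getD 1 "" ∈ D) ∧
        (p.headD "" = "swap" → p.getD 1 "" ∈ D ∧ p.getD 2 "" ∈ D)) :
    ops.reverse.foldl (bStep subD) (F0, 0, [])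
      = (FD subD F0 ops, (eCnt ops : Int), (Bk ops).reverse) := by
  induction ops with
  | nil => rfl
  | cons p ps ih =>
    have hops' := fun q hq => hops q (List.mem_cons_of_mem p hq)
    rw [List.reverse_cons, List.foldl_append, ih hops', List.foldl_cons, List.foldl_nil]
    by_cases hadd : p.headD "" = "add"
    · rw [bStep]
      simp only [if_pos hadd]
      rw [show eCnt (p :: ps) = eCnt ps - 1 from by rw [eCnt, if_pos hadd]]
      rw [show Bk (p :: ps) = (if eCnt ps = 0 then [Tm ps (p.getD 1 "")] else []) ++ Bk ps from by
        rw [Bk, if_pos hadd]]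
      rw [show FD subD F0 (p :: ps) = FD subD F0 ps from by rw [FD, if_pos hadd]]
      by_cases he : eCnt ps = 0
      · rw [if_neg (by rw [he]; simp), he, if_pos rfl]
        have hemit : (FD subD F0 ps).getD (p.getD 1 "") (p.getD 1 "") = Tm ps (p.getD 1 "") :=
          FD_inv D subD F0 hchar hsub hF0 ps hops' _ ((hops p List.mem_cons_self).1 hadd)
        rw [hemit]
        simp
      · rw [if_pos (by simpa using he), if_neg he, List.nil_append]
        simp only [Prod.mk.injEq]
        exact ⟨trivial, by omega, trivial⟩
    · by_cases hdel : p.headD "" = "del"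
      · rw [bStep]
        simp only [if_neg hadd, if_pos hdel]
        rw [show eCnt (p :: ps) = eCnt ps + 1 from by rw [eCnt, if_neg hadd, if_pos hdel]]
        rw [show Bk (p :: ps) = Bk ps from by rw [Bk, if_neg hadd]]
        rw [show FD subD F0 (p :: ps) = FD subD F0 ps from by
          rw [FD, if_neg hadd, if_pos hdel]]
        simp only [Prod.mk.injEq]
        exact ⟨trivial, by omega, trivial⟩
      · rw [bStep]
        simp only [if_neg hadd, if_neg hdel]
        rw [show eCnt (p :: ps) = eCnt ps from by rw [eCnt, if_neg hadd, if_neg hdel]]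
        rw [show Bk (p :: ps) = Bk ps from by rw [Bk, if_neg hadd]]
        by_cases hsw : p.headD "" = "swap"
        · simp only [if_pos hsw]
          rw [show FD subD F0 (p :: ps)
              = ((FD subD F0 ps).insert (p.getD 1 "")
                  ((FD subD F0 ps).getD (p.getD 2 "") (p.getD 2 ""))).insert
                  (p.getD 2 "") ((FD subD F0 ps).getD (p.getD 1 "") (p.getD 1 "")) from by
            rw [FD, if_neg hadd, if_neg hdel, if_pos hsw]]
        · simp only [if_neg hsw]
          by_cases hrot : p.headD "" = "rot"
          · simp only [if_pos hrot]
            rw [show FD subD F0 (p :: ps)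
                = subD.foldl (fun g t =>
                    g.insert t ((FD subD F0 ps).getD
                      (rotTok ((PySem.Int.ofStr? (p.getD 1 "")).getD 0) t)
                      (rotTok ((PySem.Int.ofStr? (p.getD 1 "")).getD 0) t))) (FD subD F0 ps) from by
              rw [FD, if_neg hadd, if_neg hdel, if_neg hsw, if_pos hrot]]
          · simp only [if_neg hrot]
            rw [show FD subD F0 (p :: ps) = FD subD F0 ps from by
              rw [FD, if_neg hadd, if_neg hdel, if_neg hsw, if_neg hrot]]

theorem execute_code_eq_alt (N : Int) (code : List String) :
    execute_code N code = execute_code_alt N code := by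
  simp only [execute_code, execute_code_alt]
  rw [← List.foldl_map]
  set parsed := code.map (fun op => PySem.Str.split₀ op) with hparsed
  set toks := parsed.foldl bTokStep (ALPHA.toList.map (fun ch => String.ofList [ch])) with htoks
  set D := PySem.List.dedup toks with hD
  set F0 : PySem.Dict String String := D.foldl (fun d t => d.insert t t) PySem.Dict.empty with hF0d
  set subD := D.filter (fun t => PySem.Str.isIn t ALPHA) with hsubD
  have hchar : ∀ ch ∈ ALPHA.toList, String.ofList [ch] ∈ D := by
    intro ch hch
    rw [hD, PySem.List.mem_dedup]
    exact subset_foldl_bTokStep _ _ (List.mem_map_of_mem hch)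
  have hsub : ∀ t, t ∈ subD ↔ t ∈ D ∧ PySem.Str.isIn t ALPHA = true := by
    intro t; rw [hsubD]; exact List.mem_filter
  have hF0 : ∀ t ∈ D, F0.getD t t = t := fun t ht => getD_foldl_insert_self_of_mem D _ t ht
  have hops : ∀ p ∈ parsed, (p.headD "" = "add" → p.getD 1 "" ∈ D) ∧
      (p.headD "" = "swap" → p.getD 1 "" ∈ D ∧ p.getD 2 "" ∈ D) := by
    intro p hp
    obtain ⟨h1, h2⟩ := tokens_mem_foldl_bTokStep parsed
      (ALPHA.toList.map (fun ch => String.ofList [ch])) p hp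
    refine ⟨fun h => ?_, fun h => ⟨?_, ?_⟩⟩
    · rw [hD, PySem.List.mem_dedup]; exact h1 h
    · rw [hD, PySem.List.mem_dedup]; exact (h2 h).1
    · rw [hD, PySem.List.mem_dedup]; exact (h2 h).2
  rw [foldl_execStep_eq_Bsem, Bsem_eq_take_append_Bk,
    foldl_bStep_eq D subD F0 hchar hsub hF0 parsed hops]
  simp

-- ===== VERDICT (by name: the statement is the Claim_ definition above) =====
theorem execute_code_spec : Claim_equal_execute_code := by
  intro N code _hdom _hpre
  exact execute_code_eq_alt N code
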